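-- pv_equiv track=rewrite | github.com/Swadha-Sri/NIC-Template | govsite/corepro/solar_data_service.py | resolve_metric_column
-- ===== SOURCE A (Python) =====
-- def expanded_year_label(year_label):
--     if "-" not in year_label:
--         return year_label
--
--     start, end_suffix = year_label.split("-", 1)
--     if len(start) != 4 or len(end_suffix) != 2 or not start.isdigit() or not end_suffix.isdigit():
--         return year_label
--
--     return f"{start}-{start[:2]}{end_suffix}"
--
-- def resolve_metric_column(header_map, metric_name, year_label):
--     direct = metric_name
--     if direct in header_map:
--         return header_map[direct]
--
--     metric_suffix = f"_{metric_name}"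
--     for normalized, index in header_map.items():
--         if normalized.endswith(metric_suffix):
--             return index
--
--     year_token = year_label.replace("-", "")
--     full_year_token = expanded_year_label(year_label).replace("-", "")
--     for normalized, index in header_map.items():
--         if metric_name in normalized and (year_token in normalized or full_year_token in normalized):
--             return index
--
--     return None
-- ===== SOURCE B (Python) =====
-- def expanded_year_label(year_label):
--     if "-" not in year_label:
--         return year_label
--     start, end_suffix = year_label.split("-", 1)
--     if len(start) != 4 or len(end_suffix) != 2 or not start.isdigit() or not end_suffix.isdigit():
--         return year_label
--     return f"{start}-{start[:2]}{end_suffix}"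
--
-- def resolve_metric_column(header_map, metric_name, year_label):
--     if metric_name in header_map:
--         return header_map[metric_name]
--
--     metric_suffix = f"_{metric_name}"
--     year_token = year_label.replace("-", "")
--     full_year_token = expanded_year_label(year_label).replace("-", "")
--
--     first_suffix = None
--     first_substring = None
--     for normalized, index in header_map.items():
--         if first_suffix is None and normalized.endswith(metric_suffix):
--             first_suffix = index
--         if first_substring is None and metric_name in normalized and (
--             year_token in normalized or full_year_token in normalized
--         ):
--             first_substring = index
--
--     if first_suffix is not None:
--         return first_suffix
--     return first_substring
-- ===== Notes on version B (the rewrite author's own statement) =====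
-- stated objective: alternative
-- what changed: Replaces A's two sequential early-return scans over the header map with a single traversal maintaining two first-match accumulators (first suffix match, first substring match), selecting between them after the loop.
import Mathlib
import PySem

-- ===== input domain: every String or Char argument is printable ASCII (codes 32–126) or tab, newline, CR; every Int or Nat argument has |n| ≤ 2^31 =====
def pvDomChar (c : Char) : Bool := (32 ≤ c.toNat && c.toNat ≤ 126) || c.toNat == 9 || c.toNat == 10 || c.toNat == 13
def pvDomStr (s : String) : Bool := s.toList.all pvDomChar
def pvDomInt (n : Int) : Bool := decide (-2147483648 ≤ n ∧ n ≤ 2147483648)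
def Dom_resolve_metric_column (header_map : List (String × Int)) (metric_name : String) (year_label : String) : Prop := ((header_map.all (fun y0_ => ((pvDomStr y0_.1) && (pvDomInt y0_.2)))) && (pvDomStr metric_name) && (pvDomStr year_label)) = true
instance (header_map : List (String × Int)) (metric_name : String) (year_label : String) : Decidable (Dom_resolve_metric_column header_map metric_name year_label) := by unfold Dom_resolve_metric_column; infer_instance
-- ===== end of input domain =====

-- B merges A's two sequential early-return scans into ONE traversal keeping two
-- first-match accumulators; objective: alternative decomposition (same cost).
-- ===== PORT A =====
-- shared module helper: expanded_year_label (used by both A and B, as in the Python module)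
-- direct lookup in the association-list dict: first matching key (shared by both ports)
def rmcLookup (header_map : List (String × Int)) (key : String) : Option Int :=
  match header_map with
  | [] => none
  | (k, v) :: rest => if k == key then some v else rmcLookup rest key

def expanded_year_label (year_label : String) : String :=
  if ¬ PySem.Str.isIn "-" year_label then year_label
  else
    match PySem.Str.splitMax? year_label "-" 1 with
    | some [start, end_suffix] =>
      if PySem.Str.len start ≠ 4 ∨ PySem.Str.len end_suffix ≠ 2 ∨
         ¬ PySem.Str.strIsdigit start ∨ ¬ PySem.Str.strIsdigit end_suffix then
        year_label
      else
        String.ofList (start.toList ++ ['-'] ++ PySem.List.slice start.toList none (some 2) ++ end_suffix.toList)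
    | _ => year_label  -- unreachable: "-" ∈ year_label gives exactly two pieces

-- A's first loop: return the first index whose key ends with the metric suffix
def rmcSuffixLoop (header_map : List (String × Int)) (metric_suffix : String) : Option Int :=
  match header_map with
  | [] => none
  | (normalized, index) :: rest =>
    if PySem.Str.endswith normalized metric_suffix then some index
    else rmcSuffixLoop rest metric_suffix

-- A's second loop: first index whose key contains the metric name and a year token
def rmcSubLoop (header_map : List (String × Int)) (metric_name year_token full_year_token : String) : Option Int :=
  match header_map with
  | [] => none
  | (normalized, index) :: rest =>
    if PySem.Str.isIn metric_name normalized &&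
       (PySem.Str.isIn year_token normalized || PySem.Str.isIn full_year_token normalized) then some index
    else rmcSubLoop rest metric_name year_token full_year_token

def resolve_metric_column (header_map : List (String × Int)) (metric_name : String) (year_label : String) : Option Int :=
  match rmcLookup header_map metric_name with
  | some v => some v
  | none =>
    let metric_suffix := String.ofList ('_' :: metric_name.toList)  -- f"_{metric_name}"
    match rmcSuffixLoop header_map metric_suffix with
    | some v => some v
    | none =>
      let year_token := PySem.Str.replace year_label "-" ""
      let full_year_token := PySem.Str.replace (expanded_year_label year_label) "-" ""
      rmcSubLoop header_map metric_name year_token full_year_token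

-- ===== PORT B =====
-- B's single pass: fold keeping (first suffix match, first substring match)
def rmcStep (metric_suffix metric_name year_token full_year_token : String)
    (acc : Option Int × Option Int) (kv : String × Int) : Option Int × Option Int :=
  ((if acc.1.isNone && PySem.Str.endswith kv.1 metric_suffix then some kv.2 else acc.1),
   (if acc.2.isNone && (PySem.Str.isIn metric_name kv.1 &&
       (PySem.Str.isIn year_token kv.1 || PySem.Str.isIn full_year_token kv.1)) then some kv.2 else acc.2))

def resolve_metric_column_alt (header_map : List (String × Int)) (metric_name : String) (year_label : String) : Option Int :=
  match rmcLookup header_map metric_name with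
  | some v => some v
  | none =>
    let metric_suffix := String.ofList ('_' :: metric_name.toList)
    let year_token := PySem.Str.replace year_label "-" ""
    let full_year_token := PySem.Str.replace (expanded_year_label year_label) "-" ""
    let scan := header_map.foldl (rmcStep metric_suffix metric_name year_token full_year_token) (none, none)
    match scan.1 with
    | some v => some v
    | none => scan.2

-- ===== PRECONDITION & SPEC =====
def Spec_resolve_metric_column (header_map : List (String × Int)) (metric_name : String) (year_label : String) (out : Option Int) : Prop := out = resolve_metric_column_alt header_map metric_name year_label
instance (header_map : List (String × Int)) (metric_name : String) (year_label : String) (out : Option Int) : Decidable (Spec_resolve_metric_column header_map metric_name year_label out) := by unfold Spec_resolve_metric_column; infer_instance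

-- ===== CLAIM (what is proved, stated in full; the proofs are below) =====
def Claim_equal_resolve_metric_column : Prop := ∀ (header_map : List (String × Int)) (metric_name : String) (year_label : String), Dom_resolve_metric_column header_map metric_name year_label → Spec_resolve_metric_column header_map metric_name year_label (resolve_metric_column header_map metric_name year_label)

-- ===== LEMMAS AND PROOFS =====
-- B's fold from accumulators (a, b) yields A's two first-match loop results, each
-- preempted by an already-set accumulator.
lemma rmcStep_foldl_eq (metric_suffix metric_name year_token full_year_token : String) :
    ∀ (hm : List (String × Int)) (a b : Option Int),
      hm.foldl (rmcStep metric_suffix metric_name year_token full_year_token) (a, b)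
        = (a.or (rmcSuffixLoop hm metric_suffix),
           b.or (rmcSubLoop hm metric_name year_token full_year_token)) := by
  intro hm
  induction hm with
  | nil => intro a b; cases a <;> cases b <;> simp [Option.or, rmcSuffixLoop, rmcSubLoop]
  | cons kv rest ih =>
    intro a b
    obtain ⟨k, v⟩ := kv
    cases a <;> cases b <;>
      simp only [List.foldl_cons, rmcStep, rmcSuffixLoop, rmcSubLoop, Option.isNone] <;>
      split_ifs <;> simp_all [Option.or]

-- ===== VERDICT (by name: the statement is the Claim_ definition above) =====
theorem resolve_metric_column_spec : Claim_equal_resolve_metric_column := by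
  intro hm mn yl _
  unfold Spec_resolve_metric_column resolve_metric_column resolve_metric_column_alt
  cases rmcLookup hm mn with
  | some v => rfl
  | none =>
    simp only [rmcStep_foldl_eq, Option.or]
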